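-- pv_equiv track=rewrite | github.com/Govaniii/Parsing_git_rep_in_Git_and_BB | src/part-2.py | extract_commit_info
-- ===== SOURCE A (Python) =====
-- def extract_commit_info(commit_list):
--     commit_info=[]
--     commit_start = False
--     commit_data = []
--     for line in commit_list:
--         if line.startswith('commit'):
--             if commit_start:
--                 commit_info.append(commit_data)
--             commit_data = [line]
--             commit_start= True
--         else:
--             commit_data.append(line)
--     commit_info.append(commit_data)
--     return commit_info
-- ===== SOURCE B (Python) =====
-- def extract_commit_info(commit_list):
--     lines = list(commit_list)
--     # drop the (discarded) prefix before the first commit line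
--     k = 0
--     while k < len(lines) and not lines[k].startswith('commit'):
--         k += 1
--     if k == len(lines):
--         return [lines]
--     # repeatedly slice off one commit block: the commit line plus its
--     # following non-commit lines
--     groups = []
--     rest = lines[k:]
--     while rest:
--         j = 1
--         while j < len(rest) and not rest[j].startswith('commit'):
--             j += 1
--         groups.append(rest[:j])
--         rest = rest[j:]
--     return groups
-- ===== Notes on version B (the rewrite author's own statement) =====
-- stated objective: alternative
-- what changed: Replaces A's one-pass state machine (boolean flag plus running accumulators) by a two-phase split: first find the first commit line (discarded prefix / no-commit case), then repeatedly slice off one block = commit line + following non-commit lines.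
import Mathlib
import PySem

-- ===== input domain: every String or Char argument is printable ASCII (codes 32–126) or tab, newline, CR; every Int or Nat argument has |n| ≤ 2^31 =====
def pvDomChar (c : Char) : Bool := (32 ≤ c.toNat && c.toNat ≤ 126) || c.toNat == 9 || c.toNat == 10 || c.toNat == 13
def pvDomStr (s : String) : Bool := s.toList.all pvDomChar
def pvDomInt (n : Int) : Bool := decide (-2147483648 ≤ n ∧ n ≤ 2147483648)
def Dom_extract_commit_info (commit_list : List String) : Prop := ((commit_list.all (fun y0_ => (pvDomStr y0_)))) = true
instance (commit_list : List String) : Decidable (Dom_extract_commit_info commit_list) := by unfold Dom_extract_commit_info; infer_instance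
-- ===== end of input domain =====

-- B replaces A's one-pass flag-and-accumulator state machine by a two-phase split
-- (drop the pre-commit prefix, then slice off one commit block at a time); same cost,
-- alternative decomposition. Equivalence proved on all inputs (both are total).


-- shared primitive: line.startswith('commit')
def pvIsCommit (s : String) : Bool := PySem.Str.startswith s "commit"

-- ===== PORT A =====
-- one step of A's for-loop; state = (commit_info, commit_start, commit_data)
def pvStepA (st : List (List String) × Bool × List String) (line : String) :
    List (List String) × Bool × List String :=
  let (info, started, data) := st
  if pvIsCommit line then
    ((if started then info ++ [data] else info), true, [line])
  else
    (info, started, data ++ [line])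

def extract_commit_info (commit_list : List String) : List (List String) :=
  let st := commit_list.foldl pvStepA ([], false, [])
  st.1 ++ [st.2.2]

-- ===== PORT B =====
-- the outer while loop: slice off one block (commit line + following non-commit lines) at a time
def pvChunks : List String → List (List String)
  | [] => []
  | l :: ls =>
      (l :: ls.takeWhile (fun s => !pvIsCommit s)) :: pvChunks (ls.dropWhile (fun s => !pvIsCommit s))
termination_by xs => xs.length
decreasing_by
  simpa using Nat.lt_succ_of_le (List.length_dropWhile_le _ _)

-- the k-scan: lines[k:] where k is the index of the first commit line (all of lines if none)
def pvDropPre : List String → List String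
  | [] => []
  | l :: ls => if pvIsCommit l then l :: ls else pvDropPre ls

def extract_commit_info_alt (commit_list : List String) : List (List String) :=
  let rest := pvDropPre commit_list
  if rest = [] then [commit_list] else pvChunks rest

-- ===== PRECONDITION & SPEC =====
def Spec_extract_commit_info (commit_list : List String) (out : List (List String)) : Prop := out = extract_commit_info_alt commit_list
instance (commit_list : List String) (out : List (List String)) : Decidable (Spec_extract_commit_info commit_list out) := by unfold Spec_extract_commit_info; infer_instance

-- ===== CLAIM (what is proved, stated in full; the proofs are below) =====
def Claim_equal_extract_commit_info : Prop := ∀ (commit_list : List String), Dom_extract_commit_info commit_list → Spec_extract_commit_info commit_list (extract_commit_info commit_list)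

-- ===== LEMMAS AND PROOFS =====

theorem pvDropPre_eq_dropWhile (xs : List String) :
    pvDropPre xs = xs.dropWhile (fun s => !pvIsCommit s) := by
  induction xs with
  | nil => rfl
  | cons l ls ih =>
      simp only [pvDropPre, List.dropWhile_cons]
      by_cases h : pvIsCommit l <;> simp [h, ih]

-- A's loop from a started state produces the open group (data ++ leading non-commit
-- lines) followed by the chunks of the remainder.
theorem pvFoldA_started (xs : List String) (info : List (List String)) (data : List String) :
    (xs.foldl pvStepA (info, true, data)).1 ++ [(xs.foldl pvStepA (info, true, data)).2.2]
      = info ++ (data ++ xs.takeWhile (fun s => !pvIsCommit s))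
          :: pvChunks (xs.dropWhile (fun s => !pvIsCommit s)) := by
  induction xs generalizing info data with
  | nil => simp [pvChunks]
  | cons l ls ih =>
      by_cases h : pvIsCommit l
      · simp only [List.foldl_cons, pvStepA, h, if_true]
        rw [ih]
        simp [h, pvChunks]
      · simp only [List.foldl_cons, pvStepA, h, Bool.false_eq_true, if_false]
        rw [ih]
        simp [h]

-- A's loop from the unstarted state: if no commit line remains the accumulated data
-- plus the rest forms the single group, else the pre-commit prefix is discarded.
theorem pvFoldA_unstarted (xs : List String) (info : List (List String)) (data : List String) :
    (xs.foldl pvStepA (info, false, data)).1 ++ [(xs.foldl pvStepA (info, false, data)).2.2]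
      = info ++ (if xs.dropWhile (fun s => !pvIsCommit s) = []
          then [data ++ xs]
          else pvChunks (xs.dropWhile (fun s => !pvIsCommit s))) := by
  induction xs generalizing info data with
  | nil => simp
  | cons l ls ih =>
      by_cases h : pvIsCommit l
      · simp only [List.foldl_cons, pvStepA, h, if_true, Bool.false_eq_true, if_false]
        rw [pvFoldA_started]
        simp [h, pvChunks]
      · simp only [List.foldl_cons, pvStepA, h, Bool.false_eq_true, if_false]
        rw [ih]
        simp [h]

-- ===== VERDICT (by name: the statement is the Claim_ definition above) =====
theorem extract_commit_info_spec : Claim_equal_extract_commit_info := by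
  intro xs _
  unfold Spec_extract_commit_info extract_commit_info extract_commit_info_alt
  rw [pvDropPre_eq_dropWhile]
  have h := pvFoldA_unstarted xs [] []
  simp only [List.nil_append] at h
  rw [show (List.foldl pvStepA ([], false, []) xs).1 ++ [(List.foldl pvStepA ([], false, []) xs).2.2]
        = _ from h]
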